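-- pv_equiv track=rewrite | github.com/srbcheema1/Exam_scheduler | exam_scheduler/util.py | fabricate
-- ===== SOURCE A (Python) =====
-- def fabricate(arr,seed=5):
--     seed = int(seed)
--     if seed >= len(arr)/2: seed = len(arr)//3
--     ret = []
--     i = seed
--     while i > 0:
--         j = i - 1
--         while j < len(arr):
--             ret.append(arr[j])
--             j += seed
--         i -= 1
--     return ret
-- ===== SOURCE B (Python) =====
-- def fabricate(arr, seed=5):
--     seed = int(seed)
--     if seed >= len(arr)/2: seed = len(arr)//3
--     if seed <= 0:
--         return []
--     buckets = {}
--     for idx, x in enumerate(arr):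
--         buckets.setdefault(idx % seed, []).append(x)
--     ret = []
--     for r in range(seed - 1, -1, -1):
--         ret += buckets.get(r, [])
--     return ret
-- ===== Notes on version B (the rewrite author's own statement) =====
-- stated objective: alternative
-- what changed: Replaces A's nested strided-index while loops with a single enumerate pass that groups elements into residue-class buckets in a dict, then concatenates the buckets from residue seed-1 down to 0 (plus an explicit early return [] when the adjusted seed is not positive, where A's loops simply never run).
import Mathlib
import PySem

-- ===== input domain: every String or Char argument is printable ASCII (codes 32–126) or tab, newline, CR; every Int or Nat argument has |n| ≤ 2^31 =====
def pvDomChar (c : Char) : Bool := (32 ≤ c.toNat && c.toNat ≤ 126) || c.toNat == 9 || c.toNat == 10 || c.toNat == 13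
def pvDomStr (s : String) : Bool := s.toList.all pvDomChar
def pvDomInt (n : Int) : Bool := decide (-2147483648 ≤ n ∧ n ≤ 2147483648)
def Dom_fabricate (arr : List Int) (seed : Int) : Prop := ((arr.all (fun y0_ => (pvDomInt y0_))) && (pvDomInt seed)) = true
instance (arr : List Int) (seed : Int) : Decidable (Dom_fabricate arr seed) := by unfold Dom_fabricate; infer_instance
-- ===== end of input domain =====

-- B replaces A's nested strided while loops by one enumerate pass grouping elements into
-- residue-class buckets (a dict) concatenated from residue seed-1 down to 0; equal return values.

-- ===== PORT A =====
-- inner 'while j < len(arr): ret.append(arr[j]); j += seed' loop of A.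
-- The guards 0 ≤ j and 0 < s are totality guards only: at every call site j ≥ 0 and s ≥ 1
-- (the outer loop only runs with i > 0), exactly where Python's arr[j] is in range.
def fabChain (arr : List Int) (s : Int) (j : Int) : List Int :=
  if 0 ≤ j ∧ j < (arr.length : Int) ∧ 0 < s then
    PySem.List.pyGetD arr j 0 :: fabChain arr s (j + s)
  else []
  termination_by ((arr.length : Int) - j).toNat
  decreasing_by omega

-- outer 'while i > 0' loop of A
def fabOuter (arr : List Int) (s : Int) (i : Int) : List Int :=
  if 0 < i then fabChain arr s (i - 1) ++ fabOuter arr s (i - 1) else []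
  termination_by i.toNat
  decreasing_by omega

def fabricate (arr : List Int) (seed : Int) : List Int :=
  -- 'seed >= len(arr)/2' compares an int to the exact half-integer len/2: equal to len ≤ 2*seed
  let s := if (arr.length : Int) ≤ 2 * seed then PySem.Int.floordiv (arr.length : Int) 3 else seed
  fabOuter arr s s

-- ===== PORT B =====
def fabricate_alt (arr : List Int) (seed : Int) : List Int :=
  let s := if (arr.length : Int) ≤ 2 * seed then PySem.Int.floordiv (arr.length : Int) 3 else seed
  if s ≤ 0 then []
  else
    let d : PySem.Dict Int (List Int) :=
      (PySem.List.enumerate arr 0).foldl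
        (fun d p => d.modify (PySem.Int.mod p.1 s) [] (· ++ [p.2])) PySem.Dict.empty
    (PySem.List.pyRange (s - 1) (-1) (-1)).foldl (fun ret r => ret ++ d.getD r []) []

-- ===== PRECONDITION & SPEC =====
def Spec_fabricate (arr : List Int) (seed : Int) (out : List Int) : Prop := out = fabricate_alt arr seed
instance (arr : List Int) (seed : Int) (out : List Int) : Decidable (Spec_fabricate arr seed out) := by unfold Spec_fabricate; infer_instance

-- ===== CLAIM (what is proved, stated in full; the proofs are below) =====
def Claim_equal_fabricate : Prop := ∀ (arr : List Int) (seed : Int), Dom_fabricate arr seed → Spec_fabricate arr seed (fabricate arr seed)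

-- ===== LEMMAS AND PROOFS =====

-- appending one element to the array appends it to the chain iff its index is hit by the stride
theorem fabChain_snoc (arr : List Int) (x : Int) (s j : Int) (hs : 0 < s) (hj : 0 ≤ j) :
    fabChain (arr ++ [x]) s j =
      fabChain arr s j ++
        (if j ≤ (arr.length : Int) ∧ ((arr.length : Int) - j) % s = 0 then [x] else []) := by
  rcases lt_trichotomy j (arr.length : Int) with hlt | heq | hgt
  · have ih := fabChain_snoc arr x s (j + s) hs (by omega)
    rw [fabChain.eq_def (arr ++ [x])]
    rw [if_pos (by simp; omega : 0 ≤ j ∧ j < ((arr ++ [x]).length : Int) ∧ 0 < s)]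
    rw [fabChain.eq_def arr, if_pos ⟨hj, hlt, hs⟩]
    have hhead : PySem.List.pyGetD (arr ++ [x]) j 0 = PySem.List.pyGetD arr j 0 := by
      rw [PySem.List.pyGetD_eq_getElem _ _ hj (by simp; omega),
          PySem.List.pyGetD_eq_getElem _ _ hj (by omega)]
      exact List.getElem_append_left (by omega)
    rw [hhead, ih]
    have hcond : (j + s ≤ (arr.length : Int) ∧ ((arr.length : Int) - (j + s)) % s = 0) ↔
        (j ≤ (arr.length : Int) ∧ ((arr.length : Int) - j) % s = 0) := by
      have hm : ((arr.length : Int) - (j + s)) % s = ((arr.length : Int) - j) % s := by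
        have e : (arr.length : Int) - (j + s) = ((arr.length : Int) - j) - s := by ring
        rw [e, Int.sub_emod_right]
      constructor
      · rintro ⟨h1, h2⟩; exact ⟨by omega, by rw [← hm]; exact h2⟩
      · rintro ⟨h1, h2⟩
        refine ⟨?_, by rw [hm]; exact h2⟩
        by_contra hcon
        have hb : (arr.length : Int) - j < s := by omega
        have := Int.emod_eq_of_lt (by omega : (0:Int) ≤ (arr.length : Int) - j) hb
        omega
    by_cases hc : j ≤ (arr.length : Int) ∧ ((arr.length : Int) - j) % s = 0
    · rw [if_pos hc, if_pos (hcond.mpr hc)]; simp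
    · rw [if_neg hc, if_neg (fun h => hc (hcond.mp h))]; simp
  · rw [fabChain.eq_def (arr ++ [x])]
    rw [if_pos (by simp; omega : 0 ≤ j ∧ j < ((arr ++ [x]).length : Int) ∧ 0 < s)]
    rw [fabChain.eq_def (arr ++ [x]) s (j + s), if_neg (by simp; omega)]
    rw [fabChain.eq_def arr, if_neg (by omega)]
    have hx : PySem.List.pyGetD (arr ++ [x]) j 0 = x := by
      rw [PySem.List.pyGetD_eq_getElem _ _ hj (by simp; omega)]
      have : j.toNat = arr.length := by omega
      simp [this]
    rw [if_pos ⟨by omega, by simp [← heq]⟩, hx]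
    simp
  · rw [fabChain.eq_def (arr ++ [x]), if_neg (by simp; omega),
        fabChain.eq_def arr, if_neg (by omega), if_neg (by omega)]
    simp
  termination_by ((arr.length : Int) + 1 - j).toNat
  decreasing_by omega

-- the chain starting at residue r collects exactly the elements whose index ≡ r (mod s)
theorem fabChain_eq_filter (arr : List Int) (s r : Int) (hs : 0 < s) (hr0 : 0 ≤ r) (hrs : r < s) :
    fabChain arr s r =
      ((PySem.List.enumerate arr 0).filter (fun p => PySem.Int.mod p.1 s == r)).map (·.2) := by
  induction arr using List.reverseRecOn with
  | nil =>
    rw [fabChain.eq_def, if_neg (by simp; omega)]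
    simp [PySem.List.enumerate_nil]
  | append_singleton arr x ih =>
    rw [fabChain_snoc arr x s r hs hr0, ih, PySem.List.enumerate_append]
    rw [List.filter_append, List.map_append]
    have hen : PySem.List.enumerate [x] (0 + (arr.length : Int)) = [((arr.length : Int), x)] := by
      simp [PySem.List.enumerate_cons, PySem.List.enumerate_nil]
    rw [hen]
    congr 1
    have hmod : PySem.Int.mod (arr.length : Int) s = (arr.length : Int) % s :=
      PySem.Int.mod_eq_emod_of_pos (b := s) (by omega)
    have hlen : (0:Int) ≤ (arr.length : Int) := by positivity
    have hcond : ((arr.length : Int) % s = r) ↔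
        (r ≤ (arr.length : Int) ∧ ((arr.length : Int) - r) % s = 0) := by
      constructor
      · intro h
        have h1 : (arr.length : Int) % s < s := Int.emod_lt_of_pos _ hs
        have h2 : (arr.length : Int) % s ≤ (arr.length : Int) := by
          by_cases hc : (arr.length : Int) < s
          · rw [Int.emod_eq_of_lt hlen hc]
          · omega
        refine ⟨by omega, ?_⟩
        have := Int.sub_emod (arr.length : Int) r s
        rw [Int.emod_eq_of_lt hr0 hrs, h] at this
        simp at this
        exact Int.emod_eq_zero_of_dvd this
      · rintro ⟨h1, h2⟩
        obtain ⟨q, hq⟩ := Int.dvd_of_emod_eq_zero h2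
        have e : (arr.length : Int) = r + s * q := by omega
        rw [e, Int.add_mul_emod_self_left, Int.emod_eq_of_lt hr0 hrs]
    by_cases hc : r ≤ (arr.length : Int) ∧ ((arr.length : Int) - r) % s = 0
    · rw [if_pos hc]
      simp [hmod, hcond.mpr hc]
    · rw [if_neg hc]
      have : ¬ ((arr.length : Int) % s = r) := fun h => hc (hcond.mp h)
      simp [hmod, this]

-- the outer loop is the concatenation of the chains for i-1, i-2, …, 0
theorem fabOuter_eq_flatten (arr : List Int) (s i : Int) (hi : 0 ≤ i) :
    fabOuter arr s i =
      ((PySem.List.pyRange (i - 1) (-1) (-1)).map (fun r => fabChain arr s r)).flatten := by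
  rw [fabOuter.eq_def]
  by_cases hi0 : 0 < i
  · rw [if_pos hi0, PySem.List.pyRange_neg_one_cons (by omega : (-1:Int) < i - 1)]
    rw [List.map_cons, List.flatten_cons, fabOuter_eq_flatten arr s (i - 1) (by omega)]
  · rw [if_neg hi0, PySem.List.pyRange_neg_one_eq_nil (by omega : i - 1 ≤ -1)]
    simp
  termination_by i.toNat
  decreasing_by omega

-- bucket r of B's dict is the same filtered sequence
theorem bucket_eq_filter (arr : List Int) (s r : Int) :
    (((PySem.List.enumerate arr 0).foldl
        (fun d p => d.modify (PySem.Int.mod p.1 s) [] (· ++ [p.2]))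
        (PySem.Dict.empty : PySem.Dict Int (List Int))).getD r []) =
      ((PySem.List.enumerate arr 0).filter (fun p => PySem.Int.mod p.1 s == r)).map (·.2) := by
  have e := List.foldl_map (f := fun (p : Int × Int) => ((PySem.Int.mod p.1 s), p.2))
    (g := fun (d : PySem.Dict Int (List Int)) (p : Int × Int) => d.modify p.1 [] (· ++ [p.2]))
    (l := PySem.List.enumerate arr 0) (init := (PySem.Dict.empty : PySem.Dict Int (List Int)))
  simp only at e
  rw [← e, PySem.Dict.getD_foldl_modify_append]
  rw [List.filter_map]
  rw [List.map_map]
  rfl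

-- ===== VERDICT (by name: the statement is the Claim_ definition above) =====
theorem fabricate_spec : Claim_equal_fabricate := by
  intro arr seed _
  unfold Spec_fabricate fabricate fabricate_alt
  set s := if (arr.length : Int) ≤ 2 * seed then PySem.Int.floordiv (arr.length : Int) 3 else seed with hsdef
  by_cases hs : s ≤ 0
  · rw [if_pos hs, fabOuter.eq_def, if_neg (by omega)]
  · rw [if_neg hs]
    rw [fabOuter_eq_flatten arr s s (by omega)]
    rw [PySem.List.foldl_append_eq_flatMap]
    rw [List.nil_append, List.flatMap_def]
    congr 1
    refine List.map_congr_left (fun r hr => ?_)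
    rw [PySem.List.mem_pyRange_neg_one] at hr
    rw [bucket_eq_filter, fabChain_eq_filter arr s r (by omega) (by omega) (by omega)]
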